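-- pv_equiv track=rewrite | github.com/hanckmann/matrixdriver | driver/matrixdriver/matrixdriver.py | decode_stream
-- ===== SOURCE A (Python) =====
-- import copy
--
-- def get_bit(value: int, index: int) -> int:
--     """
--     Get the bit on index.
--
--     Parameters
--     ----------
--     index : int
--         The index of the bit to get
--     value : int
--         The value of the byte (represented by an int) from which to get the index bit
--
--     Returns
--     -------
--     int
--         The changed value (with the set bit)
--     """
--     return ((value & (1 << index)) != 0)
--
-- def get_bits_as_list(value: int) -> list:
--     """
--     Get the bits as list.
--
--     Parameters
--     ----------
--     value : int
--         The value of the byte (represented by an int) from which to get the binary sequence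
--
--     Returns
--     -------
--     list
--         A list of integers representing the binary sequence of a byte
--     """
--     bits = [0, 0, 0, 0, 0, 0, 0, 0]
--     for index in range(8):
--         if get_bit(value, index):
--             bits[index] = 1
--     return bits
--
-- def decode_stream(writebytes: list) -> tuple:
--     """
--     Decode the spi->writebytes data to the frame representation.
--
--     *Note* that the input color order is different from the output color order (see below).
--
--     Parameters
--     ----------
--     writebytes : list
--         The list of integers as send via spi->writebytes (==[red: int, blue: int, green: int, column:int])
--
--     Returns
--     -------
--     tuple
--         A tuple with the frame representation per color in the order red, green, blue
--     """
--     red = get_bits_as_list(writebytes[0])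
--     green = get_bits_as_list(writebytes[1])
--     blue = get_bits_as_list(writebytes[2])
--     column = get_bits_as_list(writebytes[3])
--     empty_frame = [[2 for _ in range(8)] for _ in range(8)]
--     frame_red = copy.deepcopy(empty_frame)
--     frame_green = copy.deepcopy(empty_frame)
--     frame_blue = copy.deepcopy(empty_frame)
--     # Check which column we are working on
--     for x_index, x_bit in enumerate(column):
--         if x_bit:
--             # Check which LED we are working on
--             for y_index, y_bit in enumerate(red):
--                 frame_red[x_index][y_index] = y_bit
--             for y_index, y_bit in enumerate(green):
--                 frame_green[x_index][y_index] = y_bit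
--             for y_index, y_bit in enumerate(blue):
--                 frame_blue[x_index][y_index] = y_bit
--
--     return (frame_red, frame_green, frame_blue)
-- ===== SOURCE B (Python) =====
-- def decode_stream(writebytes: list) -> tuple:
--     red, green, blue, column = writebytes[0], writebytes[1], writebytes[2], writebytes[3]
--
--     def row_bits(value, n):
--         # peel the low bit arithmetically; value//2 is Python's arithmetic shift
--         if n == 0:
--             return []
--         q, r = divmod(value, 2)
--         return [r] + row_bits(q, n - 1)
--
--     def frame(col, color, n):
--         # recurse on the halved column byte: one fresh row per peeled column bit
--         if n == 0:
--             return []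
--         q, r = divmod(col, 2)
--         head = row_bits(color, 8) if r else [2] * 8
--         return [head] + frame(q, color, n - 1)
--
--     return (frame(column, red, 8), frame(column, green, 8), frame(column, blue, 8))
-- ===== Notes on version B (the rewrite author's own statement) =====
-- stated objective: alternative
-- what changed: Replaces A's staged passes (build four bit lists with indexed writes, deepcopy three all-2 frames, overwrite cells via nested enumerate loops) by direct structural recursion on the integers: divmod(value,2) peels one bit per recursive call, and the frame recursion halves the column byte, emitting per call either a freshly recursed bit row or [2]*8 - no bit list for the column, no prefilled frames, no index arithmetic.
import Mathlib
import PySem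

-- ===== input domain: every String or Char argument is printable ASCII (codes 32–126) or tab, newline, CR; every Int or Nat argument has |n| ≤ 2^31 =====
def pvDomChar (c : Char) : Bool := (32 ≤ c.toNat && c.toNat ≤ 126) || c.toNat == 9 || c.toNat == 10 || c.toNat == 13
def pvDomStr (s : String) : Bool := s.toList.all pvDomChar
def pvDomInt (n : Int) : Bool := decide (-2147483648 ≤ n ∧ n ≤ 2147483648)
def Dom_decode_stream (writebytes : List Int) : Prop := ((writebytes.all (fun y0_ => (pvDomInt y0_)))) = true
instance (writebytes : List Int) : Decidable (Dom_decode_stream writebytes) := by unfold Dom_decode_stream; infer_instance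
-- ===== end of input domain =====

-- B replaces A's staged passes (bit lists via indexed writes, deepcopied all-2 frames,
-- nested overwrite loops) by structural recursion peeling bits with divmod(·, 2);
-- same return value, no argument is mutated by either version.

-- ===== PORT A =====
-- get_bit: Python returns the bool (value & (1 << index)) != 0; index is always 0..7 here,
-- so the `.toNat` on the shift amount is exact.
def pvGetBit (value : Int) (index : Int) : Bool :=
  PySem.Int.band value ((1:Int) <<< index.toNat) != 0

-- bits = [0]*8; for index in range(8): if get_bit(value, index): bits[index] = 1
def pvGetBitsAsList (value : Int) : List Int :=
  (PySem.List.pyRange 0 8 1).foldl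
    (fun bits index => if pvGetBit value index then bits.set index.toNat 1 else bits)
    [0, 0, 0, 0, 0, 0, 0, 0]

def decode_stream (writebytes : List Int) : List (List Int) × List (List Int) × List (List Int) :=
  -- writebytes[i] raises IndexError for len < 4: excluded by Pre_; .getD 0 is never the value used
  let red := pvGetBitsAsList ((PySem.List.pyGet? writebytes 0).getD 0)
  let green := pvGetBitsAsList ((PySem.List.pyGet? writebytes 1).getD 0)
  let blue := pvGetBitsAsList ((PySem.List.pyGet? writebytes 2).getD 0)
  let column := pvGetBitsAsList ((PySem.List.pyGet? writebytes 3).getD 0)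
  let empty_frame := (PySem.List.pyRange 0 8 1).map (fun _ => (PySem.List.pyRange 0 8 1).map (fun _ => (2:Int)))
  let frame_red := empty_frame    -- copy.deepcopy: a value copy
  let frame_green := empty_frame
  let frame_blue := empty_frame
  let st := (PySem.List.enumerate column 0).foldl
    (fun (st : List (List Int) × List (List Int) × List (List Int)) xp =>
      if xp.2 ≠ 0 then
        -- frame[x_index][y_index] = y_bit, cell by cell (enumerate indices are ≥ 0: .toNat exact)
        ((PySem.List.enumerate red 0).foldl
          (fun f yp => f.modify xp.1.toNat (fun row => row.set yp.1.toNat yp.2)) st.1,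
         (PySem.List.enumerate green 0).foldl
          (fun f yp => f.modify xp.1.toNat (fun row => row.set yp.1.toNat yp.2)) st.2.1,
         (PySem.List.enumerate blue 0).foldl
          (fun f yp => f.modify xp.1.toNat (fun row => row.set yp.1.toNat yp.2)) st.2.2)
      else st)
    (frame_red, frame_green, frame_blue)
  (st.1, st.2.1, st.2.2)

-- ===== PORT B =====
-- row_bits(value, n): q, r = divmod(value, 2); [r] + row_bits(q, n-1)
def pvRowBits : Int → Nat → List Int
  | _, 0 => []
  | v, n+1 => PySem.Int.mod v 2 :: pvRowBits (PySem.Int.floordiv v 2) n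

-- frame(col, color, n): q, r = divmod(col, 2); [row_bits(color,8) if r else [2]*8] + frame(q, color, n-1)
def pvFrame : Int → Int → Nat → List (List Int)
  | _, _, 0 => []
  | c, v, n+1 =>
    (if PySem.Int.mod c 2 ≠ 0 then pvRowBits v 8 else List.replicate 8 2) ::
      pvFrame (PySem.Int.floordiv c 2) v n

def decode_stream_alt (writebytes : List Int) : List (List Int) × List (List Int) × List (List Int) :=
  -- writebytes[i] raises IndexError for len < 4: excluded by Pre_; .getD 0 is never the value used
  let red := (PySem.List.pyGet? writebytes 0).getD 0
  let green := (PySem.List.pyGet? writebytes 1).getD 0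
  let blue := (PySem.List.pyGet? writebytes 2).getD 0
  let column := (PySem.List.pyGet? writebytes 3).getD 0
  (pvFrame column red 8, pvFrame column green 8, pvFrame column blue 8)

-- ===== PRECONDITION & SPEC =====
-- Both A and B raise IndexError when fewer than 4 bytes are given.
def Pre_decode_stream (writebytes : List Int) : Prop := 4 ≤ writebytes.length
instance (writebytes : List Int) : Decidable (Pre_decode_stream writebytes) := by
  unfold Pre_decode_stream; infer_instance

def pvWitness_decode_stream : List Int := [5, 0, 255, 3]

def Spec_decode_stream (writebytes : List Int) (out : List (List Int) × List (List Int) × List (List Int)) : Prop := out = decode_stream_alt writebytes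
instance (writebytes : List Int) (out : List (List Int) × List (List Int) × List (List Int)) : Decidable (Spec_decode_stream writebytes out) := by unfold Spec_decode_stream; infer_instance

-- ===== CLAIM (what is proved, stated in full; the proofs are below) =====
def Claim_equal_decode_stream : Prop := ∀ (writebytes : List Int), Dom_decode_stream writebytes → Pre_decode_stream writebytes → Spec_decode_stream writebytes (decode_stream writebytes)

-- ===== LEMMAS AND PROOFS =====

-- the common bit-list specification both ports are reduced to
def pvBitAt (v : Int) (i : Nat) : Int := if pvGetBit v (i : Int) then 1 else 0

def pvBits (v : Int) : List Int := (List.range 8).map (pvBitAt v)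

lemma pv_take_set {α : Type} (l : List α) (n : Nat) (a : α) (h : n < l.length) :
    (l.set n a).take (n + 1) = l.take n ++ [a] := by
  rw [List.take_add_one]
  simp [List.take_set_of_le (Nat.le_refl n), List.getElem?_set_self (by omega)]

lemma pv_take_succ_getElem {α : Type} (l : List α) (n : Nat) (h : n < l.length) :
    l.take (n + 1) = l.take n ++ [l[n]] := by
  rw [List.take_add_one]
  simp [List.getElem?_eq_getElem h]

-- the set-fold over range(n, 8) writes bit i at every index i ≥ n
lemma pv_bits_fold (v : Int) : ∀ (nsl n : Nat) (acc : List Int), n + nsl = 8 → acc.length = 8 →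
    (PySem.List.pyRange (n:Int) 8 1).foldl
      (fun bits index => if pvGetBit v index then bits.set index.toNat 1 else bits) acc
    = acc.take n ++ (List.range nsl).map
        (fun (k : Nat) => if pvGetBit v ((n:Int) + (k:Int)) then 1 else acc.getD (n + k) 0) := by
  intro nsl
  induction nsl with
  | zero =>
    intro n acc hn hl
    rw [PySem.List.pyRange_one_eq_nil (by omega)]
    simp only [List.foldl_nil, List.range_zero, List.map_nil, List.append_nil]
    rw [List.take_of_length_le (by omega)]
  | succ m ih =>
    intro n acc hn hl
    rw [PySem.List.pyRange_one_cons (by exact_mod_cast (by omega : (n:Int) < 8)), List.foldl_cons]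
    have hcast : ((n:Int) + 1) = (((n+1 : Nat)):Int) := by push_cast; ring
    rw [hcast]
    by_cases hb : pvGetBit v (n:Int)
    · rw [if_pos hb]
      have htn : ((n:Int)).toNat = n := Int.toNat_natCast n
      rw [htn]
      rw [ih (n+1) (acc.set n 1) (by omega) (by simpa using hl)]
      rw [pv_take_set acc n 1 (by omega)]
      rw [List.range_succ_eq_map, List.map_cons, List.map_map]
      simp only [Nat.cast_zero, add_zero, if_pos hb, List.append_assoc, List.singleton_append]
      congr 1
      congr 1
      all_goals
        first
        | (simp [List.getD]; done)
        | (apply List.map_congr_left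
           intro k hk
           have e2 : n + 1 + k = n + (k + 1) := by omega
           have e3 : ((n:Int) + 1 + (k:Int)) = (n:Int) + ((k:Int) + 1) := by ring
           simp only [Function.comp_apply, Nat.succ_eq_add_one, Nat.cast_add, Nat.cast_one, e2, e3,
             List.getD, List.getElem?_set_ne (show n ≠ n + (k + 1) by omega)])
    · rw [if_neg hb]
      rw [ih (n+1) acc (by omega) hl]
      rw [pv_take_succ_getElem acc n (by omega)]
      rw [List.range_succ_eq_map, List.map_cons, List.map_map]
      simp only [Nat.cast_zero, add_zero, if_neg hb, List.append_assoc, List.singleton_append]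
      rw [List.getD_eq_getElem _ _ (show n < acc.length by omega)]
      congr 1
      congr 1
      apply List.map_congr_left
      intro k hk
      have e2 : n + 1 + k = n + (k + 1) := by omega
      have e3 : ((n:Int) + 1 + (k:Int)) = (n:Int) + ((k:Int) + 1) := by ring
      simp only [Function.comp_apply, Nat.succ_eq_add_one, Nat.cast_add, Nat.cast_one, e2, e3]

-- A's bit list equals the specification list
lemma pv_bits_eq (v : Int) : pvGetBitsAsList v = pvBits v := by
  unfold pvGetBitsAsList pvBits
  have h := pv_bits_fold v 8 0 [0,0,0,0,0,0,0,0] (by omega) (by simp)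
  simp only [Nat.cast_zero] at h
  rw [h, show List.range 8 = [0,1,2,3,4,5,6,7] from rfl]
  simp only [List.map_cons, List.map_nil, List.take_zero, List.nil_append]
  norm_num [pvBitAt, List.getD]

lemma pv_bits_length (v : Int) : (pvBits v).length = 8 := by
  unfold pvBits; simp

-- mask and shift bridges for B's divmod recursion
lemma pv_band_neg (a b : Int) (ha : a < 0) (hb : 0 ≤ b) :
    PySem.Int.band a b = ((b.toNat - (b.toNat &&& (-a - 1).toNat) : Nat) : Int) := by
  unfold PySem.Int.band
  rw [if_neg (by omega), if_pos hb]

lemma pv_mask (k : Nat) : ((1:Int) <<< k) = (((2^k : Nat)) : Int) := by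
  rw [Int.shiftLeft_eq]
  push_cast
  ring

-- low bit as 0/1 is exactly v % 2
lemma pv_bit_zero (v : Int) :
    (if pvGetBit v ((0:Nat):Int) then (1:Int) else 0) = PySem.Int.mod v 2 := by
  have hm : PySem.Int.band v ((1:Int) <<< (((0:Nat):Int)).toNat) = PySem.Int.mod v 2 := by
    rw [show (((0:Nat):Int)).toNat = 0 from rfl, show ((1:Int) <<< (0:Nat)) = 1 from rfl,
        PySem.Int.band_one]
  have h0 : 0 ≤ PySem.Int.mod v 2 := PySem.Int.mod_nonneg v (by omega)
  have h2 : PySem.Int.mod v 2 < 2 := PySem.Int.mod_lt v (by omega)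
  simp only [pvGetBit, hm, bne_iff_ne, ne_eq, ite_not]
  split_ifs with h <;> omega

-- bit (k+1) of v is bit k of v // 2
lemma pv_bit_shift (v : Int) (k : Nat) :
    pvGetBit v (((k+1:Nat)):Int) = pvGetBit (PySem.Int.floordiv v 2) ((k:Nat):Int) := by
  have hq : PySem.Int.floordiv v 2 * 2 + PySem.Int.mod v 2 = v :=
    PySem.Int.floordiv_mul_add_mod v 2
  have hr0 : 0 ≤ PySem.Int.mod v 2 := PySem.Int.mod_nonneg v (by omega)
  have hr2 : PySem.Int.mod v 2 < 2 := PySem.Int.mod_lt v (by omega)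
  set q := PySem.Int.floordiv v 2 with hqdef
  have hp1 : 0 < 2^(k+1) := Nat.pow_pos (by omega)
  have hp2 : 0 < 2^k := Nat.pow_pos (by omega)
  simp only [pvGetBit, Int.toNat_natCast]
  rw [Bool.eq_iff_iff]
  simp only [bne_iff_ne, ne_eq, not_iff_not]
  by_cases hv : 0 ≤ v
  · -- nonnegative: Nat bit arithmetic
    have hq0 : 0 ≤ q := by omega
    have hqv : q.toNat = v.toNat / 2 := by omega
    rw [pv_mask, pv_mask, PySem.Int.band_of_nonneg hv (by positivity),
        PySem.Int.band_of_nonneg hq0 (by positivity),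
        Int.toNat_natCast, Int.toNat_natCast, hqv,
        Nat.and_two_pow, Nat.and_two_pow, Nat.testBit_add_one]
    cases hbit : (v.toNat / 2).testBit k
    all_goals simp only [Bool.toNat_true, Bool.toNat_false, zero_mul, one_mul]
    all_goals omega
  · -- negative: two's complement via m = -v-1, with -q-1 = m / 2
    have hvneg : v < 0 := by omega
    have hqneg : q < 0 := by omega
    have hhalf : (-v - 1).toNat / 2 = (-q - 1).toNat := by omega
    rw [pv_mask, pv_mask, pv_band_neg v _ hvneg (by positivity),
        pv_band_neg q _ hqneg (by positivity),
        Int.toNat_natCast, Int.toNat_natCast,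
        Nat.and_comm (2^(k+1)), Nat.and_comm (2^k),
        Nat.and_two_pow, Nat.and_two_pow, Nat.testBit_add_one, hhalf]
    cases hbit : ((-q - 1).toNat).testBit k
    all_goals simp only [Bool.toNat_true, Bool.toNat_false, zero_mul, one_mul]
    all_goals omega

-- B's row recursion computes the specification bits
lemma pvRowBits_succ (v : Int) (m : Nat) :
    pvRowBits v (m+1) = PySem.Int.mod v 2 :: pvRowBits (PySem.Int.floordiv v 2) m := rfl

lemma pv_row_eq_aux : ∀ (n : Nat) (v : Int),
    pvRowBits v n = (List.range n).map (pvBitAt v) := by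
  intro n
  induction n with
  | zero => intro v; rfl
  | succ m ih =>
    intro v
    rw [pvRowBits_succ, List.range_succ_eq_map, List.map_cons, List.map_map,
        ih (PySem.Int.floordiv v 2)]
    congr 1
    · simp only [pvBitAt]
      exact (pv_bit_zero v).symm
    · apply List.map_congr_left
      intro k _
      simp only [Function.comp_apply, Nat.succ_eq_add_one, pvBitAt]
      rw [pv_bit_shift v k]

lemma pv_row_eq (v : Int) : pvRowBits v 8 = pvBits v := pv_row_eq_aux 8 v

-- B's frame recursion is the column-bit map over the row
lemma pv_frame_eq_aux : ∀ (n : Nat) (c v : Int),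
    pvFrame c v n
      = (pvRowBits c n).map (fun bit => if bit ≠ 0 then pvRowBits v 8 else List.replicate 8 2) := by
  intro n
  induction n with
  | zero => intro c v; rfl
  | succ m ih =>
    intro c v
    rw [pvFrame, pvRowBits_succ c m, List.map_cons, ih (PySem.Int.floordiv c 2) v]

lemma pv_frame_eq (c v : Int) :
    pvFrame c v 8 = (pvBits c).map (fun bit => if bit ≠ 0 then pvBits v else List.replicate 8 2) := by
  rw [pv_frame_eq_aux, pv_row_eq, pv_row_eq]

lemma pv_modify_id {α : Type} : ∀ (f : List α) (x : Nat), f.modify x (fun r => r) = f := by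
  intro f
  induction f with
  | nil => intro x; cases x <;> rfl
  | cons a f ih =>
    intro x
    cases x with
    | zero => simp [List.modify]
    | succ x => simpa [List.modify] using ih x

-- repeated modify at the same index is one modify by the composed function
lemma pv_fold_modify (x : Nat) : ∀ (el : List (Int × Int)) (f : List (List Int)),
    el.foldl (fun f yp => f.modify x (fun row => row.set yp.1.toNat yp.2)) f
      = f.modify x (fun row => el.foldl (fun r yp => r.set yp.1.toNat yp.2) row) := by
  intro el
  induction el with
  | nil => intro f; exact (pv_modify_id f x).symm
  | cons yp el ih =>
    intro f
    rw [List.foldl_cons, ih, List.modify_modify_eq]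
    rfl

-- writing color[k] at row position s+k for every k fills positions s.. with color
lemma pv_row_fill : ∀ (l : List Int) (s : Nat) (row : List Int), row.length = s + l.length →
    (PySem.List.enumerate l (s:Int)).foldl (fun r yp => r.set yp.1.toNat yp.2) row
      = row.take s ++ l := by
  intro l
  induction l with
  | nil =>
    intro s row h
    rw [PySem.List.enumerate_nil]
    simp only [List.length_nil, Nat.add_zero] at h
    simp only [List.foldl_nil, List.append_nil]
    rw [List.take_of_length_le (show row.length ≤ s by omega)]
  | cons a l ih =>
    intro s row h
    simp only [List.length_cons] at h
    rw [PySem.List.enumerate_cons, List.foldl_cons]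
    have hcast : ((s:Int) + 1) = (((s+1 : Nat)):Int) := by push_cast; ring
    rw [hcast]
    have htn : ((s:Int)).toNat = s := Int.toNat_natCast s
    simp only [htn]
    rw [ih (s+1) (row.set s a) (by simp only [List.length_set]; omega)]
    rw [pv_take_set row s a (by omega)]
    simp

-- the main loop: each set column bit replaces that row of all three frames by the color bits
lemma pv_frames (red green blue : List Int)
    (hr : red.length = 8) (hg : green.length = 8) (hb : blue.length = 8) :
    ∀ (col : List Int) (s : Nat) (fr fg fb : List (List Int)),
    fr.length = s + col.length → fg.length = s + col.length → fb.length = s + col.length →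
    (∀ j, s ≤ j → ∀ (hj : j < fr.length), fr[j] = List.replicate 8 2) →
    (∀ j, s ≤ j → ∀ (hj : j < fg.length), fg[j] = List.replicate 8 2) →
    (∀ j, s ≤ j → ∀ (hj : j < fb.length), fb[j] = List.replicate 8 2) →
    (PySem.List.enumerate col (s:Int)).foldl
      (fun (st : List (List Int) × List (List Int) × List (List Int)) xp =>
        if xp.2 ≠ 0 then
          ((PySem.List.enumerate red 0).foldl
            (fun f yp => f.modify xp.1.toNat (fun row => row.set yp.1.toNat yp.2)) st.1,
           (PySem.List.enumerate green 0).foldl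
            (fun f yp => f.modify xp.1.toNat (fun row => row.set yp.1.toNat yp.2)) st.2.1,
           (PySem.List.enumerate blue 0).foldl
            (fun f yp => f.modify xp.1.toNat (fun row => row.set yp.1.toNat yp.2)) st.2.2)
        else st)
      (fr, fg, fb)
    = (fr.take s ++ col.map (fun bit => if bit ≠ 0 then red else List.replicate 8 2),
       fg.take s ++ col.map (fun bit => if bit ≠ 0 then green else List.replicate 8 2),
       fb.take s ++ col.map (fun bit => if bit ≠ 0 then blue else List.replicate 8 2)) := by
  intro col
  induction col with
  | nil =>
    intro s fr fg fb h1 h2 h3 _ _ _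
    rw [PySem.List.enumerate_nil]
    simp only [List.length_nil, Nat.add_zero] at h1 h2 h3
    simp only [List.foldl_nil, List.map_nil, List.append_nil]
    rw [List.take_of_length_le (show fr.length ≤ s by omega),
        List.take_of_length_le (show fg.length ≤ s by omega),
        List.take_of_length_le (show fb.length ≤ s by omega)]
  | cons bit col ih =>
    intro s fr fg fb h1 h2 h3 i1 i2 i3
    simp only [List.length_cons] at h1 h2 h3
    rw [PySem.List.enumerate_cons, List.foldl_cons]
    have hcast : ((s:Int) + 1) = (((s+1 : Nat)):Int) := by push_cast; ring
    rw [hcast]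
    have hfill : ∀ (t : List Int), t.length = 8 → ∀ (f : List (List Int)) (hsf : s < f.length),
        f[s]'hsf = List.replicate 8 2 →
        (PySem.List.enumerate t 0).foldl
          (fun f yp => f.modify ((s:Int)).toNat (fun row => row.set yp.1.toNat yp.2)) f
        = f.set s t := by
      intro t ht f hsf hrow
      have htn : ((s:Int)).toNat = s := Int.toNat_natCast s
      rw [htn, pv_fold_modify s, List.modify_eq_set_get _ (by omega)]
      congr 1
      rw [List.get_eq_getElem, hrow]
      have h0 : ((0:Nat):Int) = (0:Int) := rfl
      rw [← h0, pv_row_fill t 0 (List.replicate 8 2) (by simp [ht])]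
      simp
    by_cases hb0 : bit ≠ 0
    · simp only [if_pos hb0]
      rw [hfill red hr fr (by omega) (i1 s (Nat.le_refl s) (by omega)),
          hfill green hg fg (by omega) (i2 s (Nat.le_refl s) (by omega)),
          hfill blue hb fb (by omega) (i3 s (Nat.le_refl s) (by omega))]
      rw [ih (s+1) (fr.set s red) (fg.set s green) (fb.set s blue)
        (by simp; omega) (by simp; omega) (by simp; omega)
        (by intro j hj hjl; rw [List.getElem_set_ne (by omega)]; exact i1 j (by omega) (by simpa using hjl))
        (by intro j hj hjl; rw [List.getElem_set_ne (by omega)]; exact i2 j (by omega) (by simpa using hjl))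
        (by intro j hj hjl; rw [List.getElem_set_ne (by omega)]; exact i3 j (by omega) (by simpa using hjl))]
      rw [pv_take_set fr s red (by omega), pv_take_set fg s green (by omega),
          pv_take_set fb s blue (by omega)]
      simp [hb0]
    · simp only [if_neg hb0]
      rw [ih (s+1) fr fg fb (by omega) (by omega) (by omega)
        (fun j hj hjl => i1 j (by omega) hjl)
        (fun j hj hjl => i2 j (by omega) hjl)
        (fun j hj hjl => i3 j (by omega) hjl)]
      rw [pv_take_succ_getElem fr s (by omega), pv_take_succ_getElem fg s (by omega),
          pv_take_succ_getElem fb s (by omega)]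
      rw [i1 s (Nat.le_refl s) (by omega), i2 s (Nat.le_refl s) (by omega),
          i3 s (Nat.le_refl s) (by omega)]
      rw [not_ne_iff] at hb0
      simp [hb0]

lemma pv_empty_frame :
    (PySem.List.pyRange 0 8 1).map (fun _ => (PySem.List.pyRange 0 8 1).map (fun _ => (2:Int)))
      = List.replicate 8 (List.replicate 8 2) := by decide

lemma pv_core (w0 w1 w2 w3 : Int) (rest : List Int) :
    decode_stream (w0 :: w1 :: w2 :: w3 :: rest) = decode_stream_alt (w0 :: w1 :: w2 :: w3 :: rest) := by
  have hg0 : (PySem.List.pyGet? (w0 :: w1 :: w2 :: w3 :: rest) 0).getD 0 = w0 := by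
    rw [PySem.List.pyGet?_zero_cons]; rfl
  have hg1 : (PySem.List.pyGet? (w0 :: w1 :: w2 :: w3 :: rest) 1).getD 0 = w1 := by
    rw [show (1:Int) = ((1:Nat):Int) from rfl, PySem.List.pyGet?_natCast]; rfl
  have hg2 : (PySem.List.pyGet? (w0 :: w1 :: w2 :: w3 :: rest) 2).getD 0 = w2 := by
    rw [show (2:Int) = ((2:Nat):Int) from rfl, PySem.List.pyGet?_natCast]; rfl
  have hg3 : (PySem.List.pyGet? (w0 :: w1 :: w2 :: w3 :: rest) 3).getD 0 = w3 := by
    rw [show (3:Int) = ((3:Nat):Int) from rfl, PySem.List.pyGet?_natCast]; rfl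
  simp only [decode_stream, decode_stream_alt]
  rw [hg0, hg1, hg2, hg3, pv_empty_frame,
      pv_bits_eq w0, pv_bits_eq w1, pv_bits_eq w2, pv_bits_eq w3,
      pv_frame_eq w3 w0, pv_frame_eq w3 w1, pv_frame_eq w3 w2]
  have HF := pv_frames (pvBits w0) (pvBits w1) (pvBits w2)
    (pv_bits_length w0) (pv_bits_length w1) (pv_bits_length w2)
    (pvBits w3) 0
    (List.replicate 8 (List.replicate 8 2)) (List.replicate 8 (List.replicate 8 2))
    (List.replicate 8 (List.replicate 8 2))
    (by simp [pv_bits_length]) (by simp [pv_bits_length]) (by simp [pv_bits_length])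
    (fun j _ hj => List.getElem_replicate hj)
    (fun j _ hj => List.getElem_replicate hj)
    (fun j _ hj => List.getElem_replicate hj)
  simp only [Nat.cast_zero, List.take_zero, List.nil_append] at HF
  rw [HF]

-- ===== VERDICT (by name: the statement is the Claim_ definition above) =====
theorem decode_stream_spec : Claim_equal_decode_stream := by
  intro wb _ hpre
  unfold Spec_decode_stream
  match wb, hpre with
  | w0 :: w1 :: w2 :: w3 :: rest, _ => exact pv_core w0 w1 w2 w3 rest
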